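-- pv_equiv track=rewrite | github.com/RegusAl/UBB | Semestrul 1/Fundamentele Programarii/Tehnici de programare/Divide and Conquer/verificare_element_impar.py | verificare_element_impar
-- ===== SOURCE A (Python) =====
-- def verificare_element_impar(l):
--     if len(l) == 0:
--         return False
--     if len(l) == 1:
--         if l[0] % 2 == 1:
--             return True
--         else:
--             return False
--     middle = len(l) // 2
--     return verificare_element_impar(l[:middle]) or verificare_element_impar(l[middle:])
-- ===== SOURCE B (Python) =====
-- def verificare_element_impar(l):
--     for x in l:
--         if x % 2 == 1:
--             return True
--     return False
-- ===== Notes on version B (the rewrite author's own statement) =====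
-- stated objective: simpler
-- what changed: Replaces the recursive half-splitting divide-and-conquer (slicing the list and OR-ing two recursive calls) with one flat loop that returns True at the first odd element.
import Mathlib
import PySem

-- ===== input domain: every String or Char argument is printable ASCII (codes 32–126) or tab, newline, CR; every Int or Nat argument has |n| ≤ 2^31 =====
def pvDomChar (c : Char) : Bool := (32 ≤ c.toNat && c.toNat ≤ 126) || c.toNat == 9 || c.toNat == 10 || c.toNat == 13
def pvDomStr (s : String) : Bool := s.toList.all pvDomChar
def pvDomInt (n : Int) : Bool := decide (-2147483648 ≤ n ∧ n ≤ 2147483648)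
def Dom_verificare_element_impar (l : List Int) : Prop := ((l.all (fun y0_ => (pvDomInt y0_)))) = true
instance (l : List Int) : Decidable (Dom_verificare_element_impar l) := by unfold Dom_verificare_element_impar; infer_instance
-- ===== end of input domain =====

-- B replaces A's recursive half-splitting divide-and-conquer with one flat early-exit loop.


-- ===== PORT A =====
def verificare_element_impar (l : List Int) : Bool :=
  if l.length = 0 then false
  else if l.length = 1 then
    if PySem.Int.mod ((PySem.List.pyGet? l 0).getD 0) 2 = 1 then true else false
  else
    let middle := PySem.Int.floordiv (l.length : Int) 2
    verificare_element_impar (PySem.List.slice l none (some middle)) ||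
    verificare_element_impar (PySem.List.slice l (some middle) none)
termination_by l.length
decreasing_by
  · have h : PySem.Int.floordiv (l.length : Int) 2 = ((l.length / 2 : Nat) : Int) := by
      exact_mod_cast PySem.Int.floordiv_natCast l.length 2
    rw [h, PySem.List.slice_to_natCast]
    rw [List.length_take]
    omega
  · have h : PySem.Int.floordiv (l.length : Int) 2 = ((l.length / 2 : Nat) : Int) := by
      exact_mod_cast PySem.Int.floordiv_natCast l.length 2
    rw [h, PySem.List.slice_from_natCast]
    rw [List.length_drop]
    omega

-- ===== PORT B =====
def verificare_element_impar_alt : List Int → Bool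
  | [] => false
  | x :: xs => if PySem.Int.mod x 2 = 1 then true else verificare_element_impar_alt xs

-- ===== PRECONDITION & SPEC =====
def Spec_verificare_element_impar (l : List Int) (out : Bool) : Prop := out = verificare_element_impar_alt l
instance (l : List Int) (out : Bool) : Decidable (Spec_verificare_element_impar l out) := by unfold Spec_verificare_element_impar; infer_instance

-- ===== CLAIM (what is proved, stated in full; the proofs are below) =====
def Claim_equal_verificare_element_impar : Prop := ∀ (l : List Int), Dom_verificare_element_impar l → Spec_verificare_element_impar l (verificare_element_impar l)

-- ===== LEMMAS AND PROOFS =====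

lemma alt_eq_any (l : List Int) :
    verificare_element_impar_alt l = l.any (fun x => PySem.Int.mod x 2 = 1) := by
  induction l with
  | nil => rfl
  | cons x xs ih => by_cases h : PySem.Int.mod x 2 = 1 <;> simp [verificare_element_impar_alt, h, ih]

lemma alt_append (a b : List Int) :
    verificare_element_impar_alt (a ++ b) =
      (verificare_element_impar_alt a || verificare_element_impar_alt b) := by
  simp [alt_eq_any]

lemma a_eq_alt (l : List Int) : verificare_element_impar l = verificare_element_impar_alt l := by
  induction hn : l.length using Nat.strong_induction_on generalizing l with
  | _ n ih =>
    subst hn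
    rw [verificare_element_impar]
    by_cases h0 : l.length = 0
    · have : l = [] := List.eq_nil_of_length_eq_zero h0
      subst this; rfl
    by_cases h1 : l.length = 1
    · obtain ⟨x, hx⟩ : ∃ x, l = [x] := by
        cases l with
        | nil => simp at h1
        | cons a t =>
          cases t with
          | nil => exact ⟨a, rfl⟩
          | cons b t => simp at h1
      subst hx
      simp [verificare_element_impar_alt, PySem.List.pyGet?, PySem.List.pyIdx?]
    · simp only [if_neg h0, if_neg h1]
      have hmid : PySem.Int.floordiv ((l.length : Int)) 2 = ((l.length / 2 : Nat) : Int) := by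
        exact_mod_cast PySem.Int.floordiv_natCast l.length 2
      rw [hmid, PySem.List.slice_to_natCast, PySem.List.slice_from_natCast]
      have e1 := ih (l.take (l.length / 2)).length (by simp; omega) _ rfl
      have e2 := ih (l.drop (l.length / 2)).length (by simp; omega) _ rfl
      rw [e1, e2, ← alt_append, List.take_append_drop]

-- ===== VERDICT (by name: the statement is the Claim_ definition above) =====
theorem verificare_element_impar_spec : Claim_equal_verificare_element_impar := by
  intro l _
  unfold Spec_verificare_element_impar
  exact a_eq_alt l
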